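-- pv_equiv track=rewrite | github.com/JDSB123/green_bier_sports_ncaam_model | scripts/validate_team_aliases.py | compare_aliases
-- ===== SOURCE A (Python) =====
-- def compare_aliases(
--     hardcoded: dict[str, str],
--     db_aliases: dict[str, str]
-- ) -> tuple[set[str], set[str], dict[str, tuple[str, str]]]:
--     """
--     Compare hardcoded aliases with database.
--
--     Returns:
--         - only_in_code: Aliases only in hardcoded dict
--         - only_in_db: Aliases only in database
--         - mismatched: Aliases with different canonical names {alias: (code_value, db_value)}
--     """
--     code_keys = set(hardcoded.keys())
--     db_keys = set(db_aliases.keys())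
--
--     only_in_code = code_keys - db_keys
--     only_in_db = db_keys - code_keys
--
--     mismatched = {}
--     for key in code_keys & db_keys:
--         if hardcoded[key] != db_aliases[key]:
--             mismatched[key] = (hardcoded[key], db_aliases[key])
--
--     return only_in_code, only_in_db, mismatched
-- ===== SOURCE B (Python) =====
-- def compare_aliases(
--     hardcoded: dict[str, str],
--     db_aliases: dict[str, str]
-- ) -> tuple[set[str], set[str], dict[str, tuple[str, str]]]:
--     """Build one full-outer-join table keyed by alias, then classify each joined record."""
--     merged = {}
--     for key, code_val in hardcoded.items():
--         merged[key] = (code_val, None)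
--     for key, db_val in db_aliases.items():
--         prev = merged.get(key)
--         merged[key] = (prev[0] if prev is not None else None, db_val)
--     only_in_code = set()
--     only_in_db = set()
--     mismatched = {}
--     for key, (code_val, db_val) in merged.items():
--         if db_val is None:
--             only_in_code.add(key)
--         elif code_val is None:
--             only_in_db.add(key)
--         elif code_val != db_val:
--             mismatched[key] = (code_val, db_val)
--     return only_in_code, only_in_db, mismatched
-- ===== Notes on version B (the rewrite author's own statement) =====
-- stated objective: alternative
-- what changed: Instead of set algebra over key sets (or per-key membership tests), B first builds a single full-outer-join table mapping each alias to its (code value, db value) pair by folding both dicts into one merged dict, then classifies each joined record into only-in-code / only-in-db / mismatched in one pass over the merged table, never testing membership in the original dicts.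
import Mathlib
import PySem

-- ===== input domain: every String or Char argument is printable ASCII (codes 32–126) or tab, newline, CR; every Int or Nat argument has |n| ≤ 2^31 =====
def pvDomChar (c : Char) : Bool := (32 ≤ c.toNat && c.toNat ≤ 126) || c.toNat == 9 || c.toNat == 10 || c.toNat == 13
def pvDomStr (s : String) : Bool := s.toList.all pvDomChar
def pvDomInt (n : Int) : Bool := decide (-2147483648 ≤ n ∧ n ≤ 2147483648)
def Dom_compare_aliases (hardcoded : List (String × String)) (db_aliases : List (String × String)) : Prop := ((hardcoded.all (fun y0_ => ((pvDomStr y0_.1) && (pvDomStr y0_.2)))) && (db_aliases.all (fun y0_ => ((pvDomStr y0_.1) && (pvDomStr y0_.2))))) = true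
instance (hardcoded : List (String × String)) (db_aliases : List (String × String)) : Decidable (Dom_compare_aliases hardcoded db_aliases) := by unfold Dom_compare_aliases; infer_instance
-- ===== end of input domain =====

-- B replaces A's key-set algebra by a different data structure: one full-outer-join table
-- (alias -> (code value, db value)) built from both dicts, then classified in a single pass
-- (objective: alternative algorithm, same cost).


-- ===== PORT A =====
def compare_aliases (hardcoded : List (String × String)) (db_aliases : List (String × String)) : List String × List String × (List (String × String × String)) :=
  let code_keys : PySem.Set String := PySem.Set.ofList (hardcoded.map Prod.fst)
  let db_keys : PySem.Set String := PySem.Set.ofList (db_aliases.map Prod.fst)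
  let only_in_code := PySem.Set.diff code_keys db_keys
  let only_in_db := PySem.Set.diff db_keys code_keys
  let hd := PySem.Dict.mk hardcoded
  let dd := PySem.Dict.mk db_aliases
  let mismatched := (PySem.Set.inter code_keys db_keys).foldl
      (fun (m : PySem.Dict String (String × String)) key =>
        let hv := (hd.get? key).getD ""
        let dv := (dd.get? key).getD ""
        if hv ≠ dv then m.insert key (hv, dv) else m)
      PySem.Dict.empty
  (only_in_code, only_in_db, mismatched.items)

-- ===== PORT B =====
def compare_aliases_alt (hardcoded : List (String × String)) (db_aliases : List (String × String)) : List String × List String × (List (String × String × String)) :=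
  let merged0 := hardcoded.foldl
      (fun (m : PySem.Dict String (Option String × Option String)) kv =>
        m.insert kv.1 (some kv.2, none))
      PySem.Dict.empty
  let merged := db_aliases.foldl
      (fun (m : PySem.Dict String (Option String × Option String)) kv =>
        match m.get? kv.1 with
        | none => m.insert kv.1 (none, some kv.2)
        | some prev => m.insert kv.1 (prev.1, some kv.2))
      merged0
  let st := merged.items.foldl
      (fun (st : List String × List String × PySem.Dict String (String × String)) it =>
        match it.2.2 with
        | none => (PySem.Set.add st.1 it.1, st.2)
        | some dv =>
          match it.2.1 with
          | none => (st.1, PySem.Set.add st.2.1 it.1, st.2.2)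
          | some cv => if cv ≠ dv then (st.1, st.2.1, st.2.2.insert it.1 (cv, dv)) else st)
      (PySem.Set.empty, PySem.Set.empty, PySem.Dict.empty)
  (st.1, st.2.1, st.2.2.items)

-- ===== PRECONDITION & SPEC =====
-- Pre_ requires both association lists to have pairwise-distinct keys: a Python dict argument
-- always satisfies this (a dict cannot hold duplicate keys), so no actual Python input is excluded.
def Pre_compare_aliases (hardcoded : List (String × String)) (db_aliases : List (String × String)) : Prop :=
  (hardcoded.map Prod.fst).Nodup ∧ (db_aliases.map Prod.fst).Nodup
instance (hardcoded : List (String × String)) (db_aliases : List (String × String)) : Decidable (Pre_compare_aliases hardcoded db_aliases) := by unfold Pre_compare_aliases; infer_instance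
def pvWitness_compare_aliases : (List (String × String)) × (List (String × String)) :=
  ([("duke", "Duke"), ("unc", "North Carolina")], [("duke", "Duke Blue Devils"), ("smu", "SMU")])
def Spec_compare_aliases (hardcoded : List (String × String)) (db_aliases : List (String × String)) (out : List String × List String × (List (String × String × String))) : Prop := out = compare_aliases_alt hardcoded db_aliases
instance (hardcoded : List (String × String)) (db_aliases : List (String × String)) (out : List String × List String × (List (String × String × String))) : Decidable (Spec_compare_aliases hardcoded db_aliases out) := by unfold Spec_compare_aliases; infer_instance

-- ===== CLAIM (what is proved, stated in full; the proofs are below) =====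
def Claim_equal_compare_aliases : Prop := ∀ (hardcoded : List (String × String)) (db_aliases : List (String × String)), Dom_compare_aliases hardcoded db_aliases → Pre_compare_aliases hardcoded db_aliases → Spec_compare_aliases hardcoded db_aliases (compare_aliases hardcoded db_aliases)

-- ===== LEMMAS AND PROOFS =====

-- the full-outer-join table B's two build loops produce, written in closed form
def pvMerged (hard p : List (String × String)) : PySem.Dict String (Option String × Option String) :=
  PySem.Dict.mk
    (hard.map (fun kv => (kv.1, ((some kv.2 : Option String), (PySem.Dict.mk p).get? kv.1))) ++
     (p.filter (fun kv => !((hard.map Prod.fst).contains kv.1))).map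
       (fun kv => (kv.1, ((none : Option String), (some kv.2 : Option String)))))

lemma get?_mk_append {ν : Type} (l1 l2 : List (String × ν)) (x : String) :
    (PySem.Dict.mk (l1 ++ l2)).get? x =
      match (PySem.Dict.mk l1).get? x with
      | some v => some v
      | none => (PySem.Dict.mk l2).get? x := by
  induction l1 with
  | nil => simp [PySem.Dict.get?]
  | cons hd tl ih =>
    rw [List.cons_append, PySem.Dict.get?_mk_cons, PySem.Dict.get?_mk_cons]
    by_cases h : hd.1 = x
    · simp [h]
    · have hb : (hd.1 == x) = false := by simp [h]
      simp [hb, ih]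

lemma keys_pvMerged (hard p : List (String × String)) :
    (pvMerged hard p).keys =
      hard.map Prod.fst ++ (p.filter (fun kv => !((hard.map Prod.fst).contains kv.1))).map Prod.fst := by
  simp [pvMerged, PySem.Dict.keys, Function.comp_def]

lemma nodup_keys_pvMerged (hard p : List (String × String))
    (hnH : (hard.map Prod.fst).Nodup) (hnP : (p.map Prod.fst).Nodup) :
    (pvMerged hard p).keys.Nodup := by
  rw [keys_pvMerged, List.nodup_append]
  refine ⟨hnH, ?_, ?_⟩
  · exact List.Nodup.sublist (List.Sublist.map Prod.fst List.filter_sublist) hnP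
  · intro x hx y hy
    rcases List.mem_map.mp hy with ⟨kv, hkv, rfl⟩
    have := List.of_mem_filter hkv
    simp only [Bool.not_eq_true', List.contains_eq_mem, decide_eq_false_iff_not] at this
    intro he
    exact this (he ▸ hx)

-- first-match lookup in a duplicate-free association list returns the entry's own value
lemma get?_mk_of_mem (l : List (String × String)) (kv : String × String)
    (hn : (l.map Prod.fst).Nodup) (hm : kv ∈ l) :
    (PySem.Dict.mk l).get? kv.1 = some kv.2 := by
  refine PySem.Dict.get?_of_mem_items _ ?_ (by simpa [PySem.Dict.keys] using hn)
  simpa using hm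


-- B's second build loop: folding db entries into the hardcoded-only table yields pvMerged
lemma merge_fold (hard : List (String × String)) (hnH : (hard.map Prod.fst).Nodup) :
    ∀ (db p : List (String × String)), ((p ++ db).map Prod.fst).Nodup →
    db.foldl
      (fun (m : PySem.Dict String (Option String × Option String)) kv =>
        match m.get? kv.1 with
        | none => m.insert kv.1 (none, some kv.2)
        | some prev => m.insert kv.1 (prev.1, some kv.2))
      (pvMerged hard p)
    = pvMerged hard (p ++ db) := by
  intro db
  induction db with
  | nil => intro p _; simp
  | cons kv tl ih =>
    intro p hn
    have hn' : ((p ++ [kv] ++ tl).map Prod.fst).Nodup := by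
      simpa [List.append_assoc] using hn
    have hkvp : kv.1 ∉ p.map Prod.fst := by
      have h0 := hn
      simp only [List.map_append, List.nodup_append] at h0
      intro hmem
      exact h0.2.2 kv.1 hmem kv.1 (by simp) rfl
    have hnP : (p.map Prod.fst).Nodup := by
      simp only [List.map_append, List.nodup_append] at hn; exact hn.1
    have hgetp : (PySem.Dict.mk p).get? kv.1 = none := by
      rw [PySem.Dict.get?_eq_none_iff_not_mem_keys]
      simpa [PySem.Dict.keys] using hkvp
    have hstep :
        (match (pvMerged hard p).get? kv.1 with
          | none => (pvMerged hard p).insert kv.1 (none, some kv.2)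
          | some prev => (pvMerged hard p).insert kv.1 (prev.1, some kv.2))
        = pvMerged hard (p ++ [kv]) := by
      by_cases hkh : kv.1 ∈ hard.map Prod.fst
      · -- kv.1 also a hardcoded key: the table entry is overwritten in place
        rcases List.mem_map.mp hkh with ⟨hkv, hhm, hfst⟩
        have hitem : (kv.1, ((some hkv.2 : Option String), (none : Option String)))
            ∈ (pvMerged hard p).items := by
          have happ : (fun kv : String × String =>
              (kv.1, ((some kv.2 : Option String), (PySem.Dict.mk p).get? kv.1))) hkv
              = (kv.1, ((some hkv.2 : Option String), (none : Option String))) := by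
            simp only [hfst, hgetp]
          simp only [pvMerged, List.mem_append]
          exact Or.inl (List.mem_map.mpr ⟨hkv, hhm, happ⟩)
        have hget : (pvMerged hard p).get? kv.1 = some (some hkv.2, none) :=
          PySem.Dict.get?_of_mem_items _ hitem (nodup_keys_pvMerged hard p hnH hnP)
        have hcont : (pvMerged hard p).contains kv.1 = true := by
          rw [PySem.Dict.contains_iff_mem_keys, keys_pvMerged]
          exact List.mem_append_left _ hkh
        rw [hget]
        apply PySem.Dict.ext
        rw [PySem.Dict.items_insert_of_contains _ _ hcont]
        have hfilt : (p ++ [kv]).filter (fun kv => !((hard.map Prod.fst).contains kv.1))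
            = p.filter (fun kv => !((hard.map Prod.fst).contains kv.1)) := by
          rw [List.filter_append]
          simp [List.contains_eq_mem, hkh]
        simp only [pvMerged, List.map_append, List.map_map, hfilt]
        congr 1
        · -- the hardcoded segment: only kv.1's row changes, to record the db value
          refine List.map_congr_left ?_
          intro kv' hkv'
          simp only [Function.comp_apply]
          by_cases he : kv'.1 = kv.1
          · have hv2 : kv'.2 = hkv.2 := by
              have h1 := get?_mk_of_mem hard kv' hnH hkv'
              have h2 := get?_mk_of_mem hard hkv hnH hhm
              rw [hfst, ← he] at h2
              exact Option.some.inj (h1.symm.trans h2)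
            have hgapp : (PySem.Dict.mk (p ++ [kv])).get? kv.1 = some kv.2 := by
              rw [get?_mk_append, hgetp]
              simp [PySem.Dict.get?]
            have hbe : (kv'.1 == kv.1) = true := by simp [he]
            simp [he, hv2, hgapp]
          · have hgapp : (PySem.Dict.mk (p ++ [kv])).get? kv'.1 = (PySem.Dict.mk p).get? kv'.1 := by
              rw [get?_mk_append]
              cases hc : (PySem.Dict.mk p).get? kv'.1 with
              | some v => rfl
              | none =>
                have hb : (kv.1 == kv'.1) = false := by
                  simp only [beq_eq_false_iff_ne, ne_eq]
                  intro h
                  exact he h.symm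
                simp [hb, PySem.Dict.get?]
            have hbe : (kv'.1 == kv.1) = false := by simp [he]
            simp [hbe, hgapp]
        · -- the db-only segment: kv.1 is a hardcoded key, so no row is touched
          refine List.map_congr_left ?_
          intro kv' hkv'
          simp only [Function.comp_apply]
          have hk'p : kv'.1 ∈ p.map Prod.fst :=
            List.mem_map.mpr ⟨kv', List.mem_of_mem_filter hkv', rfl⟩
          have hne : (kv'.1 == kv.1) = false := by
            simp only [beq_eq_false_iff_ne, ne_eq]
            intro h; exact hkvp (h ▸ hk'p)
          simp [hne]
      · -- kv.1 is a brand-new key: the entry is appended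
        have hget : (pvMerged hard p).get? kv.1 = none := by
          rw [PySem.Dict.get?_eq_none_iff_not_mem_keys, keys_pvMerged]
          simp only [List.mem_append]
          rintro (h | h)
          · exact hkh h
          · rcases List.mem_map.mp h with ⟨kv', hkv', hfst⟩
            exact hkvp (hfst ▸ List.mem_map.mpr ⟨kv', List.mem_of_mem_filter hkv', rfl⟩)
        have hcont : (pvMerged hard p).contains kv.1 = false := by
          rw [Bool.eq_false_iff, ne_eq, PySem.Dict.contains_iff_mem_keys,
            ← PySem.Dict.get?_eq_none_iff_not_mem_keys]
          exact hget
        rw [hget]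
        apply PySem.Dict.ext
        rw [PySem.Dict.items_insert_of_not_contains _ _ hcont]
        simp only [pvMerged]
        have hfilt : (p ++ [kv]).filter (fun kv => !((hard.map Prod.fst).contains kv.1))
            = p.filter (fun kv => !((hard.map Prod.fst).contains kv.1)) ++ [kv] := by
          rw [List.filter_append]
          simp [List.contains_eq_mem, hkh]
        rw [hfilt, List.map_append, ← List.append_assoc]
        congr 1
        congr 1
        refine List.map_congr_left ?_
        intro kv' hkv'
        have hgapp : (PySem.Dict.mk (p ++ [kv])).get? kv'.1 = (PySem.Dict.mk p).get? kv'.1 := by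
          rw [get?_mk_append]
          cases hc : (PySem.Dict.mk p).get? kv'.1 with
          | some v => simp [hc]
          | none =>
            have hne : (kv.1 == kv'.1) = false := by
              simp only [beq_eq_false_iff_ne, ne_eq]
              intro h
              exact hkh (h ▸ List.mem_map.mpr ⟨kv', hkv', rfl⟩)
            simp [hne, PySem.Dict.get?]
        rw [hgapp]
    rw [List.foldl_cons, hstep, show p ++ kv :: tl = (p ++ [kv]) ++ tl by simp]
    exact ih (p ++ [kv]) hn'

-- B's first build loop yields pvMerged hard []
lemma merge_init (hard : List (String × String)) (hnH : (hard.map Prod.fst).Nodup) :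
    hard.foldl
      (fun (m : PySem.Dict String (Option String × Option String)) kv =>
        m.insert kv.1 (some kv.2, none))
      PySem.Dict.empty
    = pvMerged hard [] := by
  have h := PySem.Dict.items_foldl_insert_fresh hard (fun kv : String × String => kv.1)
      (fun kv : String × String => ((some kv.2 : Option String), (none : Option String)))
      PySem.Dict.empty (fun a _ => PySem.Dict.contains_empty _) (by simpa using hnH)
  apply PySem.Dict.ext
  exact h.trans (by simp [pvMerged, PySem.Dict.empty, PySem.Dict.get?])

-- B's classification pass over a table with distinct fresh keys, in closed form
lemma classify_fold :
    ∀ (items : List (String × Option String × Option String))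
      (s1 s2 : List String) (m : PySem.Dict String (String × String)),
    (items.map Prod.fst).Nodup →
    (∀ it ∈ items, it.1 ∉ s1 ∧ it.1 ∉ s2 ∧ it.1 ∉ m.items.map Prod.fst) →
    items.foldl
      (fun (st : List String × List String × PySem.Dict String (String × String)) it =>
        match it.2.2 with
        | none => (PySem.Set.add st.1 it.1, st.2)
        | some dv =>
          match it.2.1 with
          | none => (st.1, PySem.Set.add st.2.1 it.1, st.2.2)
          | some cv => if cv ≠ dv then (st.1, st.2.1, st.2.2.insert it.1 (cv, dv)) else st)
      (s1, s2, m)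
    = (s1 ++ items.filterMap (fun it => match it.2.2 with
          | none => some it.1
          | some _ => none),
       s2 ++ items.filterMap (fun it => match it.2.2, it.2.1 with
          | some _, none => some it.1
          | _, _ => none),
       PySem.Dict.mk (m.items ++ items.filterMap (fun it => match it.2.2 with
          | none => none
          | some dv => match it.2.1 with
            | none => none
            | some cv => if cv ≠ dv then some (it.1, (cv, dv)) else none))) := by
  intro items
  induction items with
  | nil => intro s1 s2 m _ _; simp
  | cons it tl ih =>
    intro s1 s2 m hn hf
    simp only [List.map_cons, List.nodup_cons] at hn
    have hfresh : ∀ it' ∈ tl, it'.1 ≠ it.1 := fun it' h he => hn.1 (he ▸ List.mem_map_of_mem h)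
    have hf1 := hf it (by simp)
    simp only [List.foldl_cons]
    cases hdv : it.2.2 with
    | none =>
      have hadd : PySem.Set.add s1 it.1 = s1 ++ [it.1] := by
        simp [PySem.Set.add, List.contains_eq_mem, hf1.1]
      change (tl.foldl _ (PySem.Set.add s1 it.1, s2, m)) = _
      rw [hadd,
        ih (s1 ++ [it.1]) s2 m hn.2 (by
          intro it' h
          have h0 := hf it' (List.mem_cons_of_mem _ h)
          refine ⟨?_, h0.2.1, h0.2.2⟩
          simp only [List.mem_append, List.mem_singleton]
          rintro (hh | hh)
          · exact h0.1 hh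
          · exact hfresh it' h hh)]
      simp [List.filterMap_cons, hdv, List.append_assoc]
    | some dv =>
      cases hcv : it.2.1 with
      | none =>
        have hadd : PySem.Set.add s2 it.1 = s2 ++ [it.1] := by
          simp [PySem.Set.add, List.contains_eq_mem, hf1.2.1]
        change (tl.foldl _ (s1, PySem.Set.add s2 it.1, m)) = _
        rw [hadd,
          ih s1 (s2 ++ [it.1]) m hn.2 (by
            intro it' h
            have h0 := hf it' (List.mem_cons_of_mem _ h)
            refine ⟨h0.1, ?_, h0.2.2⟩
            simp only [List.mem_append, List.mem_singleton]
            rintro (hh | hh)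
            · exact h0.2.1 hh
            · exact hfresh it' h hh)]
        simp [List.filterMap_cons, hdv, hcv, List.append_assoc]
      | some cv =>
        change (tl.foldl _ (if cv ≠ dv then (s1, s2, m.insert it.1 (cv, dv)) else (s1, s2, m))) = _
        by_cases hne : cv ≠ dv
        · have hcont : m.contains it.1 = false := by
            rw [Bool.eq_false_iff, ne_eq, PySem.Dict.contains_iff_mem_keys]
            intro hc
            exact hf1.2.2 (by simpa [PySem.Dict.keys] using hc)
          rw [if_pos hne,
            ih s1 s2 (m.insert it.1 (cv, dv)) hn.2 (by
              intro it' h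
              have h0 := hf it' (List.mem_cons_of_mem _ h)
              refine ⟨h0.1, h0.2.1, ?_⟩
              rw [PySem.Dict.items_insert_of_not_contains _ _ hcont]
              simp only [List.map_append, List.mem_append]
              rintro (hh | hh)
              · exact h0.2.2 hh
              · simp at hh; exact hfresh it' h hh)]
          rw [PySem.Dict.items_insert_of_not_contains _ _ hcont]
          simp [List.filterMap_cons, hdv, hcv, hne, List.append_assoc]
        · push_neg at hne
          rw [if_neg (by simp [hne]),
            ih s1 s2 m hn.2 (fun it' h => hf it' (List.mem_cons_of_mem _ h))]
          simp [List.filterMap_cons, hdv, hcv, hne]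

-- A's mismatch-building loop over a duplicate-free key list appends one item per differing key
lemma afold_items (hv dv : String → String) :
    ∀ (ks : List String) (m : PySem.Dict String (String × String)),
    ks.Nodup → (∀ k ∈ ks, k ∉ m.items.map Prod.fst) →
    (ks.foldl (fun m key => if hv key ≠ dv key then m.insert key (hv key, dv key) else m) m).items
      = m.items ++ ks.filterMap (fun k => if hv k ≠ dv k then some (k, (hv k, dv k)) else none) := by
  intro ks
  induction ks with
  | nil => simp
  | cons k tl ih =>
    intro m hn hf
    simp only [List.nodup_cons] at hn
    have hkm : k ∉ m.items.map Prod.fst := hf k (by simp)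
    simp only [List.foldl_cons]
    by_cases hne : hv k ≠ dv k
    · have hc : m.contains k = false := by
        rw [Bool.eq_false_iff]
        intro hc
        exact hkm (by
          have := (PySem.Dict.contains_iff_mem_keys m k).mp hc
          simpa [PySem.Dict.keys] using this)
      rw [if_pos hne,
        ih _ hn.2 (by
          intro k' hk'
          have h1 := hf k' (List.mem_cons_of_mem _ hk')
          have h2 : k' ≠ k := fun he => hn.1 (he ▸ hk')
          rw [PySem.Dict.items_insert_of_not_contains _ _ hc]
          simp only [List.map_append, List.mem_append]
          rintro (hh | hh)
          · exact h1 hh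
          · simp at hh; exact h2 hh),
        PySem.Dict.items_insert_of_not_contains _ _ hc]
      simp [List.filterMap_cons, hne, List.append_assoc]
    · rw [if_neg hne, ih _ hn.2 (fun k' hk' => hf k' (List.mem_cons_of_mem _ hk'))]
      push_neg at hne
      simp [List.filterMap_cons, hne]

lemma filter_map_fst (p : String → Bool) (l : List (String × String)) :
    (l.map Prod.fst).filter p = l.filterMap (fun kv => if p kv.1 then some kv.1 else none) := by
  induction l with
  | nil => rfl
  | cons kv tl ih =>
    by_cases h : p kv.1 <;> simp [List.filter_cons, List.filterMap_cons, h, ih]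

-- ===== VERDICT (by name: the statement is the Claim_ definition above) =====
theorem compare_aliases_spec : Claim_equal_compare_aliases := by
  intro hardcoded db_aliases _ hpre
  obtain ⟨hnH, hnD⟩ := hpre
  unfold Spec_compare_aliases
  simp only [compare_aliases, compare_aliases_alt]
  rw [PySem.Set.ofList_eq_self_of_nodup _ hnH, PySem.Set.ofList_eq_self_of_nodup _ hnD,
    merge_init hardcoded hnH, merge_fold hardcoded hnH db_aliases [] (by simpa using hnD),
    List.nil_append]
  have hmkeys : ((pvMerged hardcoded db_aliases).items.map Prod.fst).Nodup := by
    have := nodup_keys_pvMerged hardcoded db_aliases hnH hnD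
    simpa [PySem.Dict.keys] using this
  rw [classify_fold (pvMerged hardcoded db_aliases).items PySem.Set.empty PySem.Set.empty
      PySem.Dict.empty hmkeys
      (by intro it _; simp [PySem.Set.empty, PySem.Dict.empty]),
    afold_items (fun k => ((PySem.Dict.mk hardcoded).get? k).getD "")
      (fun k => ((PySem.Dict.mk db_aliases).get? k).getD "")
      (PySem.Set.inter (hardcoded.map Prod.fst) (db_aliases.map Prod.fst)) PySem.Dict.empty
      (by simpa [PySem.Set.inter] using hnH.filter _)
      (by intro k _; simp [PySem.Dict.empty])]
  simp only [pvMerged, List.filterMap_append, Prod.mk.injEq, PySem.Set.empty,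
    PySem.Dict.empty, List.nil_append, List.filterMap_map]
  refine ⟨?_, ?_, ?_⟩
  · -- only_in_code
    have hright : (db_aliases.filter (fun kv => !((hardcoded.map Prod.fst).contains kv.1))).filterMap
        ((fun (it : String × Option String × Option String) => match it.2.2 with
          | none => some it.1
          | some _ => none) ∘ (fun kv => (kv.1, ((none : Option String), (some kv.2 : Option String))))) = [] := by
      simp [Function.comp]
    rw [hright, List.append_nil]
    simp only [PySem.Set.diff]
    rw [filter_map_fst]
    refine List.filterMap_congr ?_
    intro kv hm
    by_cases hdk : kv.1 ∈ db_aliases.map Prod.fst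
    · have hno : (PySem.Dict.mk db_aliases).get? kv.1 ≠ none := by
        rw [ne_eq, PySem.Dict.get?_eq_none_iff_not_mem_keys]
        simpa [PySem.Dict.keys] using hdk
      cases hc : (PySem.Dict.mk db_aliases).get? kv.1 with
      | none => exact absurd hc hno
      | some v => simp [Function.comp, List.contains_eq_mem, hdk, hc]
    · have hyes : (PySem.Dict.mk db_aliases).get? kv.1 = none := by
        rw [PySem.Dict.get?_eq_none_iff_not_mem_keys]
        simpa [PySem.Dict.keys] using hdk
      simp [Function.comp, List.contains_eq_mem, hdk, hyes]
  · -- only_in_db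
    have hleft : hardcoded.filterMap
        ((fun (it : String × Option String × Option String) => match it.2.2, it.2.1 with
          | some _, none => some it.1
          | _, _ => none) ∘ (fun kv => (kv.1, ((some kv.2 : Option String), (PySem.Dict.mk db_aliases).get? kv.1)))) = [] := by
      refine List.filterMap_eq_nil_iff.mpr ?_
      intro kv _
      cases h : (PySem.Dict.mk db_aliases).get? kv.1 <;> simp [Function.comp, h]
    rw [hleft, List.nil_append]
    simp only [PySem.Set.diff]
    have : (db_aliases.filter (fun kv => !((hardcoded.map Prod.fst).contains kv.1))).filterMap
        ((fun (it : String × Option String × Option String) => match it.2.2, it.2.1 with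
          | some _, none => some it.1
          | _, _ => none) ∘ (fun kv => (kv.1, ((none : Option String), (some kv.2 : Option String)))))
        = (db_aliases.filter (fun kv => !((hardcoded.map Prod.fst).contains kv.1))).map Prod.fst := by
      generalize db_aliases.filter (fun kv => !((hardcoded.map Prod.fst).contains kv.1)) = l
      induction l with
      | nil => rfl
      | cons a t ih => simp [List.filterMap_cons, Function.comp, ih]
    rw [this, List.filter_map]
    rfl
  · -- mismatched
    have hright : (db_aliases.filter (fun kv => !((hardcoded.map Prod.fst).contains kv.1))).filterMap
        ((fun (it : String × Option String × Option String) => match it.2.2 with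
          | none => none
          | some dv => match it.2.1 with
            | none => none
            | some cv => if cv ≠ dv then some (it.1, (cv, dv)) else none)
         ∘ (fun kv => (kv.1, ((none : Option String), (some kv.2 : Option String))))) = [] := by
      simp [Function.comp]
    rw [hright, List.append_nil]
    simp only [PySem.Set.inter]
    rw [filter_map_fst, List.filterMap_filterMap]
    refine List.filterMap_congr ?_
    intro kv hm
    cases hc : (PySem.Dict.mk db_aliases).get? kv.1 with
    | none =>
      have hdk : kv.1 ∉ db_aliases.map Prod.fst := by
        rw [PySem.Dict.get?_eq_none_iff_not_mem_keys] at hc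
        simpa [PySem.Dict.keys] using hc
      simp [Function.comp, List.contains_eq_mem, hdk, hc]
    | some dvv =>
      have hdk : kv.1 ∈ db_aliases.map Prod.fst := by
        by_contra hno
        have : (PySem.Dict.mk db_aliases).get? kv.1 = none := by
          rw [PySem.Dict.get?_eq_none_iff_not_mem_keys]
          simpa [PySem.Dict.keys] using hno
        simp [hc] at this
      have hhv : (PySem.Dict.mk hardcoded).get? kv.1 = some kv.2 :=
        get?_mk_of_mem hardcoded kv hnH hm
      by_cases hne : kv.2 = dvv
      · simp [Function.comp, List.contains_eq_mem, hdk, hc, hhv, hne]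
      · simp [Function.comp, List.contains_eq_mem, hdk, hc, hhv, hne, Ne.symm hne]
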